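-- pv_equiv track=rewrite | github.com/Luoxin/strcap | build/lib/work01.py | string_end_cap
-- ===== SOURCE A (Python) =====
-- def string_reverse1(string):
--     return string[::-1]
--
-- def string_wordcap1(string):
--     l = ""
--     for i in string.split(" "):
--         l+=(i.capitalize()+" ")
--     return l
--
-- def string_end_cap(string):
--     def string_delhaed(string):
--         l=""
--         count=0
--         for i in string:
--             if count==0:
--                 count+=1
--                 continue
--             l+=i
--         return l
--
--     string=string_reverse1(string)
--     string=string_wordcap1(string)
--     string=string_reverse1(string)
--     string=string_delhaed(string)
--     return string
-- ===== SOURCE B (Python) =====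
-- def string_end_cap(string):
--     return " ".join(w[::-1].capitalize()[::-1] for w in string.split(" "))
-- ===== Notes on version B (the rewrite author's own statement) =====
-- stated objective: simpler
-- what changed: B drops A's two whole-string reversals, the trailing-space-per-word accumulator and the manual first-character deletion, replacing them with a single split / per-word transform (reverse-capitalize-reverse) / join.
import Mathlib
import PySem

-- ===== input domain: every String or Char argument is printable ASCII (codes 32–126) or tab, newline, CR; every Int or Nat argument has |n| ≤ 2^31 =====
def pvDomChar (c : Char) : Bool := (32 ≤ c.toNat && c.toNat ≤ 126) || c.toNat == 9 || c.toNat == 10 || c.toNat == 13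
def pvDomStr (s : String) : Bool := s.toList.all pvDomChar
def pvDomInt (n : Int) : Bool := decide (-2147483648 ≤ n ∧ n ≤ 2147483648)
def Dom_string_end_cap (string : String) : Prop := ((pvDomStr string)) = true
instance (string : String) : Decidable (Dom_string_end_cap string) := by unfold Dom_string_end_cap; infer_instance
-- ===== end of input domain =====

-- B replaces A's double whole-string reversal + trailing-space trick + manual first-char drop
-- by a single split / per-word reverse-capitalize-reverse / join (objective: simpler).

-- ===== PORT A =====
-- str.capitalize(): first char titlecased, rest lowercased — exact on the ASCII domain (titlecase = upper there)
def pyCapitalize (cs : List Char) : List Char :=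
  match cs with
  | [] => []
  | c :: rest => PySem.Chars.upperChar c :: PySem.Chars.lower rest

-- string_reverse1: string[::-1]
def pyRev1 (cs : List Char) : List Char :=
  (PySem.Chars.slice? cs none none (-1)).getD []

-- string_wordcap1: l = ""; for i in string.split(" "): l += i.capitalize() + " "
def wordcap1 (cs : List Char) : List Char :=
  ((PySem.Chars.split? cs [' ']).getD []).foldl (fun l i => l ++ (pyCapitalize i ++ [' '])) []

-- string_delhaed: skip the first char via a count flag, copy the rest
def delhaed (cs : List Char) : List Char :=
  (cs.foldl (fun (p : List Char × Int) i =>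
      if p.2 == 0 then (p.1, p.2 + 1) else (p.1 ++ [i], p.2)) ([], 0)).1

def string_end_cap (string : String) : String :=
  let s1 := pyRev1 string.toList
  let s2 := wordcap1 s1
  let s3 := pyRev1 s2
  let s4 := delhaed s3
  String.ofList s4

-- ===== PORT B =====
def string_end_cap_alt (string : String) : String :=
  String.ofList (PySem.Chars.join [' ']
    (((PySem.Chars.split? string.toList [' ']).getD []).map
      (fun w => (PySem.Chars.slice?
          (pyCapitalize ((PySem.Chars.slice? w none none (-1)).getD []))
          none none (-1)).getD [])))

-- ===== PRECONDITION & SPEC =====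
def Spec_string_end_cap (string : String) (out : String) : Prop := out = string_end_cap_alt string
instance (string : String) (out : String) : Decidable (Spec_string_end_cap string out) := by unfold Spec_string_end_cap; infer_instance

-- ===== CLAIM (what is proved, stated in full; the proofs are below) =====
def Claim_equal_string_end_cap : Prop := ∀ (string : String), Dom_string_end_cap string → Spec_string_end_cap string (string_end_cap string)

-- ===== LEMMAS AND PROOFS =====

-- a front-recursion equal to PySem.Chars.splitOn with separator [' ']
def mySplit (pre : List Char) : List Char → List (List Char)
  | [] => [pre]
  | c :: rest => if c = ' ' then pre :: mySplit [] rest else mySplit (pre ++ [c]) rest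

theorem icc (a b : List Char) (l : List (List Char)) :
    List.intercalate [' '] (a :: b :: l) = a ++ ' ' :: List.intercalate [' '] (b :: l) := by
  simp [List.intercalate, List.intersperse]

theorem go_eq_mySplit (fuel : Nat) : ∀ (cs cur : List Char) (acc : List (List Char)),
    cs.length < fuel →
    PySem.Chars.splitOn.go [' '] fuel cs cur acc = acc.reverse ++ mySplit cur.reverse cs := by
  induction fuel with
  | zero => intro cs cur acc h; omega
  | succ n ih =>
    intro cs cur acc h
    cases cs with
    | nil => simp [PySem.Chars.splitOn.go, mySplit]
    | cons c rest =>
      by_cases hc : c = ' '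
      · subst hc
        simp only [PySem.Chars.splitOn.go, List.isPrefixOf, BEq.rfl, Bool.true_and,
          if_true, List.length_cons, List.length_nil, Nat.zero_add,
          List.drop_succ_cons, List.drop_zero]
        rw [ih rest [] (cur.reverse :: acc) (by simp at h; omega)]
        simp [mySplit]
      · simp only [PySem.Chars.splitOn.go, List.isPrefixOf, Bool.and_true]
        rw [show ((' ' == c : Bool)) = false from beq_eq_false_iff_ne.mpr (Ne.symm hc)]
        simp only [Bool.false_eq_true, if_false]
        rw [ih rest (c :: cur) acc (by simp at h; omega)]
        simp [mySplit, hc]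

theorem splitOn_eq_mySplit (cs : List Char) :
    PySem.Chars.splitOn cs [' '] = mySplit [] cs := by
  unfold PySem.Chars.splitOn
  rw [go_eq_mySplit (cs.length + 1) cs [] [] (by omega)]
  simp

-- mySplit never returns []
theorem mySplit_ne_nil (cs : List Char) : ∀ pre, mySplit pre cs ≠ [] := by
  induction cs with
  | nil => intro pre; simp [mySplit]
  | cons c rest ih =>
    intro pre
    by_cases hc : c = ' ' <;> simp [mySplit, hc, ih]

theorem mySplit_cons_shape (cs : List Char) (pre : List Char) :
    ∃ w ws, mySplit pre cs = w :: ws := by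
  cases h : mySplit pre cs with
  | nil => exact absurd h (mySplit_ne_nil cs pre)
  | cons w ws => exact ⟨w, ws, rfl⟩

-- completeness: joining the split back gives the string
theorem mySplit_intercalate (cs : List Char) : ∀ pre,
    List.intercalate [' '] (mySplit pre cs) = pre ++ cs := by
  induction cs with
  | nil => intro pre; simp [mySplit, List.intercalate]
  | cons c rest ih =>
    intro pre
    by_cases hc : c = ' '
    · subst hc
      simp only [mySplit, if_true]
      obtain ⟨w, ws, hsp⟩ := mySplit_cons_shape rest []
      rw [hsp, icc]
      have h1 := ih []
      rw [hsp] at h1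
      simp only [List.nil_append] at h1
      rw [h1]
    · simp only [mySplit, if_neg hc]
      rw [ih (pre ++ [c])]
      simp
-- no word of the split contains ' '
theorem mySplit_no_space (cs : List Char) : ∀ pre, (' ' ∉ pre) →
    ∀ w ∈ mySplit pre cs, ' ' ∉ w := by
  induction cs with
  | nil => intro pre hp w hw; simp [mySplit] at hw; subst hw; exact hp
  | cons c rest ih =>
    intro pre hp w hw
    by_cases hc : c = ' '
    · subst hc
      rw [show mySplit pre (' ' :: rest) = pre :: mySplit [] rest from by simp [mySplit]] at hw
      rcases List.mem_cons.mp hw with h | h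
      · subst h; exact hp
      · exact ih [] (by simp) w h
    · simp only [mySplit, if_neg hc] at hw
      refine ih (pre ++ [c]) ?_ w hw
      intro h
      rcases List.mem_append.mp h with h' | h'
      · exact hp h'
      · simp at h'; exact hc h'.symm

-- uniqueness: mySplit inverts intercalate on space-free word lists
theorem mySplit_word_prefix (w : List Char) : ∀ pre t, (' ' ∉ w) →
    mySplit pre (w ++ t) = mySplit (pre ++ w) t := by
  induction w with
  | nil => intro pre t _; simp
  | cons c cw ih =>
    intro pre t hw
    have hc : c ≠ ' ' := by intro h; exact hw (by simp [h])
    simp only [List.cons_append, mySplit, if_neg hc]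
    rw [ih (pre ++ [c]) t (by intro h; exact hw (by simp [h]))]
    simp

theorem mySplit_intercalate_inv (ws : List (List Char)) (hne : ws ≠ [])
    (hsp : ∀ w ∈ ws, ' ' ∉ w) :
    mySplit [] (List.intercalate [' '] ws) = ws := by
  induction ws with
  | nil => exact absurd rfl hne
  | cons w ws ih =>
    cases ws with
    | nil =>
      have h1 := mySplit_word_prefix w [] [] (hsp w (by simp))
      simp only [List.append_nil, List.nil_append] at h1
      rw [show List.intercalate [' '] [w] = w from by simp [List.intercalate], h1]
      simp [mySplit]
    | cons v vs =>
      rw [icc]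
      rw [show w ++ ' ' :: List.intercalate [' '] (v :: vs)
            = w ++ (' ' :: List.intercalate [' '] (v :: vs)) from rfl]
      rw [mySplit_word_prefix w [] _ (hsp w (by simp))]
      simp only [List.nil_append, mySplit, if_true]
      rw [ih (by simp) (fun u hu => hsp u (by simp [hu]))]

-- appending one word at the end of an intercalation
theorem iapp (w : List Char) : ∀ (us : List (List Char)) (u : List Char),
    List.intercalate [' '] ((u :: us) ++ [w])
      = List.intercalate [' '] (u :: us) ++ ' ' :: w := by
  intro us
  induction us with
  | nil => intro u; simp [List.intercalate]
  | cons a as iha =>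
    intro u
    simp only [List.cons_append]
    rw [icc u a (as ++ [w]), show a :: (as ++ [w]) = (a :: as) ++ [w] from rfl, iha a,
      icc u a as]
    simp

-- reversing the string reverses the intercalation (with each word reversed)
theorem intercalate_reverse (ws : List (List Char)) :
    (List.intercalate [' '] ws).reverse
      = List.intercalate [' '] ((ws.map List.reverse).reverse) := by
  induction ws with
  | nil => simp [List.intercalate]
  | cons w ws ih =>
    cases ws with
    | nil => simp [List.intercalate]
    | cons v vs =>
      rw [icc w v vs]
      obtain ⟨u, us, hsp⟩ : ∃ u us, ((v :: vs).map List.reverse).reverse = u :: us := by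
        cases h : ((v :: vs).map List.reverse).reverse with
        | nil => simp at h
        | cons u us => exact ⟨u, us, rfl⟩
      have hm : (List.map List.reverse (w :: v :: vs)).reverse
          = ((v :: vs).map List.reverse).reverse ++ [w.reverse] := by simp
      rw [hm, hsp, iapp w.reverse us u, ← hsp, ← ih]
      simp [List.reverse_append]

theorem mySplit_reverse (cs : List Char) :
    mySplit [] cs.reverse = ((mySplit [] cs).map List.reverse).reverse := by
  have h1 := mySplit_intercalate cs []
  simp only [List.nil_append] at h1
  have h2 : cs.reverse = List.intercalate [' '] (((mySplit [] cs).map List.reverse).reverse) := by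
    rw [← intercalate_reverse, h1]
  rw [h2]
  apply mySplit_intercalate_inv
  · simp [mySplit_ne_nil cs []]
  · intro w hw
    simp only [List.mem_reverse, List.mem_map] at hw
    rcases hw with ⟨u, hu, rfl⟩
    have := mySplit_no_space cs [] (by simp) u hu
    simpa using this

-- delhaed is tail
theorem delhaed_fold_one (cs : List Char) : ∀ l : List Char,
    (cs.foldl (fun (p : List Char × Int) i =>
      if p.2 == 0 then (p.1, p.2 + 1) else (p.1 ++ [i], p.2)) (l, 1)).1 = l ++ cs := by
  induction cs with
  | nil => intro l; simp
  | cons c rest ih =>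
    intro l
    simp only [List.foldl_cons]
    rw [if_neg (show ¬(((1 : Int) == 0) = true) from by decide)]
    rw [ih (l ++ [c])]
    simp

theorem delhaed_eq_tail (cs : List Char) : delhaed cs = cs.tail := by
  cases cs with
  | nil => simp [delhaed]
  | cons c rest =>
    unfold delhaed
    simp only [List.foldl_cons]
    rw [if_pos (show (((0 : Int) == 0) = true) from rfl)]
    simpa using delhaed_fold_one rest []

-- the nonempty-word-list join shape
theorem flatMap_space_cons (f : List Char → List Char) (ws : List (List Char)) (hne : ws ≠ []) :
    ws.flatMap (fun w => ' ' :: f w) = ' ' :: List.intercalate [' '] (ws.map f) := by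
  induction ws with
  | nil => exact absurd rfl hne
  | cons w ws ih =>
    cases ws with
    | nil => simp [List.intercalate]
    | cons v vs =>
      rw [List.flatMap_cons, ih (by simp)]
      simp only [List.map_cons]
      rw [icc]
      simp

-- ===== VERDICT (by name: the statement is the Claim_ definition above) =====
theorem string_end_cap_spec : Claim_equal_string_end_cap := by
  intro s _
  unfold Spec_string_end_cap string_end_cap string_end_cap_alt
  simp only [pyRev1, wordcap1]
  rw [PySem.Chars.slice?_eq_listSlice?, PySem.List.slice?_none_none_neg_one]
  simp only [Option.getD_some]
  have hsplit : ∀ t : List Char, (PySem.Chars.split? t [' ']).getD [] = mySplit [] t := by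
    intro t
    simp [PySem.Chars.split?, splitOn_eq_mySplit]
  rw [hsplit, hsplit]
  set cs := s.toList with hcs
  rw [PySem.List.foldl_append_eq_flatMap]
  rw [PySem.Chars.slice?_eq_listSlice?, PySem.List.slice?_none_none_neg_one]
  simp only [Option.getD_some, List.nil_append]
  rw [delhaed_eq_tail]
  rw [List.reverse_flatMap]
  simp only [Function.comp_def]
  rw [mySplit_reverse]
  simp only [List.reverse_reverse]
  have hmapmap : ((mySplit [] cs).map List.reverse).flatMap
        (fun x => (pyCapitalize x ++ [' ']).reverse)
      = (mySplit [] cs).flatMap (fun w => ' ' :: (pyCapitalize w.reverse).reverse) := by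
    rw [List.flatMap_map]
    simp
  rw [hmapmap]
  rw [flatMap_space_cons (fun w => (pyCapitalize w.reverse).reverse) (mySplit [] cs)
        (mySplit_ne_nil cs [])]
  simp only [List.tail_cons]
  congr 1
  unfold PySem.Chars.join
  congr 1
  apply List.map_congr_left
  intro w _
  rw [PySem.Chars.slice?_eq_listSlice?, PySem.List.slice?_none_none_neg_one]
  simp only [Option.getD_some]
  rw [PySem.Chars.slice?_eq_listSlice?, PySem.List.slice?_none_none_neg_one]
  simp
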